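-- pv_equiv track=rewrite | github.com/mikhail-dvorkin/algorithms | geometry.py | most_populated_square
-- ===== SOURCE A (Python) =====
-- def most_populated_square(p, r):
-- 	res = 0;
-- 	for px in p:
-- 		x1 = px[0]
-- 		for py in p:
-- 			y1 = py[1]
-- 			cur = 0
-- 			for x, y in p:
-- 				if x1 <= x <= x1 + r and y1 <= y <= y1 + r:
-- 					cur += 1
-- 			res = max(res, cur)
-- 	return res
-- ===== SOURCE B (Python) =====
-- def most_populated_square(p, r):
--     res = 0
--     for x1 in set(x for x, _ in p):
--         col = [y for x, y in p if x1 <= x <= x1 + r]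
--         for y1 in col:
--             cur = 0
--             for y in col:
--                 if y1 <= y <= y1 + r:
--                     cur += 1
--             res = max(res, cur)
--     return res
-- ===== Notes on version B (the rewrite author's own statement) =====
-- stated objective: faster
-- what changed: Instead of trying every (x,y) pair of points and counting over the whole list each time, B iterates over the distinct x values, builds the x-slab [x1,x1+r] once, and takes candidate bottom edges and counts only inside that slab (correct by a shift-to-minimum argument, proved as pvSlab_max).
import Mathlib
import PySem

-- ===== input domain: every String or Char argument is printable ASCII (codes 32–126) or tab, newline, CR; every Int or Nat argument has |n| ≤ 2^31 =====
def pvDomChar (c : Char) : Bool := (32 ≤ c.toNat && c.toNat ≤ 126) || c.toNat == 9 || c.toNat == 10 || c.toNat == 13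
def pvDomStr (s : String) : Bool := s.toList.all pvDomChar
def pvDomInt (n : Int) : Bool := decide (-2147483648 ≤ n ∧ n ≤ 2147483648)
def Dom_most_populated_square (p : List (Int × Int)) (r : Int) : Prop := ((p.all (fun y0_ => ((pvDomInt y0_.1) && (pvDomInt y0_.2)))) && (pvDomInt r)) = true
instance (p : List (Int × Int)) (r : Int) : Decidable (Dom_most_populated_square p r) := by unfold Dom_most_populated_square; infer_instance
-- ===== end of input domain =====

-- B restricts the square's corner candidates to each distinct x and the y's inside that x-slab,
-- counting inside the slab only (a smaller candidate set with provably the same maximum).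

-- ===== PORT A =====
def most_populated_square (p : List (Int × Int)) (r : Int) : Int :=
  p.foldl (fun res px =>
    let x1 := px.1
    p.foldl (fun res py =>
      let y1 := py.2
      let cur := p.foldl (fun cur q =>
        if x1 ≤ q.1 ∧ q.1 ≤ x1 + r ∧ y1 ≤ q.2 ∧ q.2 ≤ y1 + r then cur + 1 else cur) 0
      max res cur) res) 0

-- ===== PORT B =====
def most_populated_square_alt (p : List (Int × Int)) (r : Int) : Int :=
  (PySem.Set.ofList (p.map (fun q => q.1))).foldl (fun res x1 =>
    let col := (p.filter (fun q => decide (x1 ≤ q.1 ∧ q.1 ≤ x1 + r))).map (fun q => q.2)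
    col.foldl (fun res y1 =>
      let cur := col.foldl (fun cur y =>
        if y1 ≤ y ∧ y ≤ y1 + r then cur + 1 else cur) 0
      max res cur) res) 0

-- ===== PRECONDITION & SPEC =====
def Spec_most_populated_square (p : List (Int × Int)) (r : Int) (out : Int) : Prop := out = most_populated_square_alt p r
instance (p : List (Int × Int)) (r : Int) (out : Int) : Decidable (Spec_most_populated_square p r out) := by unfold Spec_most_populated_square; infer_instance

-- ===== CLAIM (what is proved, stated in full; the proofs are below) =====
def Claim_equal_most_populated_square : Prop := ∀ (p : List (Int × Int)) (r : Int), Dom_most_populated_square p r → Spec_most_populated_square p r (most_populated_square p r)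

-- ===== LEMMAS AND PROOFS =====

-- running maximum (with floor 0) of f over a list
def pvMaxOver {α : Type} (f : α → Int) (l : List α) : Int :=
  l.foldl (fun m a => max m (f a)) 0

theorem pvMaxOver_nonneg {α : Type} (f : α → Int) (l : List α) : 0 ≤ pvMaxOver f l :=
  (PySem.List.le_foldl_max_int l f 0).1

theorem pvLe_maxOver {α : Type} (f : α → Int) {l : List α} {a : α} (h : a ∈ l) :
    f a ≤ pvMaxOver f l :=
  (PySem.List.le_foldl_max_int l f 0).2 a h

theorem pvFoldl_max_le {α : Type} (f : α → Int) (l : List α) :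
    ∀ {c B : Int}, c ≤ B → (∀ a ∈ l, f a ≤ B) →
      l.foldl (fun m a => max m (f a)) c ≤ B := by
  induction l with
  | nil => intro c B hc _; simpa using hc
  | cons x t ih =>
      intro c B hc h
      simp only [List.foldl_cons]
      exact ih (max_le hc (h x List.mem_cons_self)) fun a ha => h a (List.mem_cons_of_mem _ ha)

theorem pvMaxOver_le {α : Type} {f : α → Int} {l : List α} {B : Int}
    (h0 : 0 ≤ B) (h : ∀ a ∈ l, f a ≤ B) : pvMaxOver f l ≤ B :=
  pvFoldl_max_le f l h0 h

theorem pvMaxOver_eq_of_mem_iff {α : Type} (f : α → Int) (l₁ l₂ : List α)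
    (h : ∀ a, a ∈ l₁ ↔ a ∈ l₂) : pvMaxOver f l₁ = pvMaxOver f l₂ := by
  refine le_antisymm ?_ ?_
  · exact pvMaxOver_le (pvMaxOver_nonneg f l₂) fun a ha => pvLe_maxOver f ((h a).mp ha)
  · exact pvMaxOver_le (pvMaxOver_nonneg f l₁) fun a ha => pvLe_maxOver f ((h a).mpr ha)

theorem pvMaxOver_congr {α : Type} {f g : α → Int} {l : List α}
    (h : ∀ a ∈ l, f a = g a) : pvMaxOver f l = pvMaxOver g l :=
  PySem.List.foldl_congr_mem l _ _ 0 fun acc x hx => by rw [h x hx]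

theorem pvMaxOver_map {α β : Type} (f : β → Int) (h : α → β) (l : List α) :
    pvMaxOver f (l.map h) = pvMaxOver (fun a => f (h a)) l := by
  unfold pvMaxOver; rw [List.foldl_map]

-- hoisting an accumulator out of a running-max fold
theorem pvFoldl_max_hoist {α : Type} (f : α → Int) (l : List α) :
    ∀ c d : Int, l.foldl (fun m a => max m (f a)) (max c d)
      = max c (l.foldl (fun m a => max m (f a)) d) := by
  induction l with
  | nil => intro c d; rfl
  | cons x t ih =>
      intro c d
      simp only [List.foldl_cons, max_assoc]
      exact ih c (max d (f x))

theorem pvFoldl_max_acc {α : Type} (f : α → Int) (l : List α) {c : Int} (hc : 0 ≤ c) :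
    l.foldl (fun m a => max m (f a)) c = max c (pvMaxOver f l) := by
  have := pvFoldl_max_hoist f l c 0
  rwa [max_eq_left hc] at this

-- a nested fold threading one accumulator is the fold of the inner maxima
theorem pvNested_foldl_eq {α β : Type} (L : List α) (g : α → List β) (v : α → β → Int) :
    ∀ c : Int, 0 ≤ c →
      L.foldl (fun res a => (g a).foldl (fun res b => max res (v a b)) res) c
      = L.foldl (fun res a => max res (pvMaxOver (v a) (g a))) c := by
  induction L with
  | nil => intro c _; rfl
  | cons x t ih =>
      intro c hc
      simp only [List.foldl_cons]
      rw [pvFoldl_max_acc (v x) (g x) hc]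
      exact ih _ (le_trans hc (le_max_left _ _))

-- the counts of A and B as countP, and the x-slab of a candidate x1
def pvCnt (p : List (Int × Int)) (r x1 y1 : Int) : Int :=
  (p.countP (fun q => decide (x1 ≤ q.1 ∧ q.1 ≤ x1 + r ∧ y1 ≤ q.2 ∧ q.2 ≤ y1 + r)) : Int)

def pvCol (p : List (Int × Int)) (r x1 : Int) : List Int :=
  (p.filter (fun q => decide (x1 ≤ q.1 ∧ q.1 ≤ x1 + r))).map (fun q => q.2)

def pvCntB (p : List (Int × Int)) (r x1 y1 : Int) : Int :=
  ((pvCol p r x1).countP (fun y => decide (y1 ≤ y ∧ y ≤ y1 + r)) : Int)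

theorem pvCnt_eq_cntB (p : List (Int × Int)) (r x1 y1 : Int) :
    pvCnt p r x1 y1 = pvCntB p r x1 y1 := by
  unfold pvCnt pvCntB pvCol
  rw [List.countP_map, List.countP_filter]
  refine congrArg _ (List.countP_congr fun q _ => ?_)
  simp [Function.comp]; tauto

theorem pvA_eq (p : List (Int × Int)) (r : Int) :
    most_populated_square p r
      = pvMaxOver (fun px => pvMaxOver (fun py => pvCnt p r px.1 py.2) p) p := by
  unfold most_populated_square pvMaxOver pvCnt
  simp only [PySem.List.foldl_ite_add_one, zero_add]
  exact pvNested_foldl_eq p (fun _ => p)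
    (fun px py =>
      (p.countP (fun q => decide (px.1 ≤ q.1 ∧ q.1 ≤ px.1 + r ∧ py.2 ≤ q.2 ∧ q.2 ≤ py.2 + r)) : Int))
    0 le_rfl

theorem pvB_eq (p : List (Int × Int)) (r : Int) :
    most_populated_square_alt p r
      = pvMaxOver (fun x1 => pvMaxOver (fun y1 => pvCntB p r x1 y1) (pvCol p r x1))
          (PySem.Set.ofList (p.map (fun q => q.1))) := by
  unfold most_populated_square_alt pvMaxOver pvCntB pvCol
  simp only [PySem.List.foldl_ite_add_one, zero_add]
  exact pvNested_foldl_eq (PySem.Set.ofList (p.map (fun q => q.1)))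
    (fun x1 => (p.filter (fun q => decide (x1 ≤ q.1 ∧ q.1 ≤ x1 + r))).map (fun q => q.2))
    (fun x1 y1 =>
      (((p.filter (fun q => decide (x1 ≤ q.1 ∧ q.1 ≤ x1 + r))).map (fun q => q.2)).countP
        (fun y => decide (y1 ≤ y ∧ y ≤ y1 + r)) : Int))
    0 le_rfl

-- the key algorithmic fact: inside one x-slab, restricting the bottom-edge candidates to the
-- slab's own y-coordinates preserves the maximal count
theorem pvSlab_max (p : List (Int × Int)) (r x1 : Int) :
    pvMaxOver (fun py => pvCntB p r x1 py.2) p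
      = pvMaxOver (fun y1 => pvCntB p r x1 y1) (pvCol p r x1) := by
  refine le_antisymm ?_ ?_
  · refine pvMaxOver_le (pvMaxOver_nonneg _ _) fun py _ => ?_
    by_cases hz : (pvCol p r x1).countP (fun y => decide (py.2 ≤ y ∧ y ≤ py.2 + r)) = 0
    · unfold pvCntB; rw [hz]; exact pvMaxOver_nonneg _ _
    · have hpos := Nat.pos_of_ne_zero hz
      obtain ⟨y0, hy0mem, hy0⟩ := List.countP_pos_iff.mp hpos
      have hy0' : py.2 ≤ y0 ∧ y0 ≤ py.2 + r := by simpa using hy0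
      have hS : y0 ∈ (pvCol p r x1).filter (fun y => decide (py.2 ≤ y)) :=
        List.mem_filter.mpr ⟨hy0mem, by simpa using hy0'.1⟩
      obtain ⟨m, hm⟩ : ∃ m, PySem.List.min?
          ((pvCol p r x1).filter (fun y => decide (py.2 ≤ y))) (fun y => y) = some m := by
        cases h : PySem.List.min?
            ((pvCol p r x1).filter (fun y => decide (py.2 ≤ y))) (fun y => y) with
        | none =>
            rw [PySem.List.min?_eq_none_iff] at h
            exact absurd (h ▸ hS) (List.not_mem_nil)
        | some m => exact ⟨m, rfl⟩
      have hmS := PySem.List.min?_mem hm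
      have hmin := PySem.List.min?_isMin hm
      have hmcol : m ∈ pvCol p r x1 := List.mem_of_mem_filter hmS
      have htm : py.2 ≤ m := by simpa using (List.mem_filter.mp hmS).2
      have hle : pvCntB p r x1 py.2 ≤ pvCntB p r x1 m := by
        unfold pvCntB
        have := List.countP_mono_left (l := pvCol p r x1)
          (p := fun y => decide (py.2 ≤ y ∧ y ≤ py.2 + r))
          (q := fun y => decide (m ≤ y ∧ y ≤ m + r)) ?_
        · exact_mod_cast this
        · intro y hy hwy
          have hwy' : py.2 ≤ y ∧ y ≤ py.2 + r := by simpa using hwy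
          have hyS : y ∈ (pvCol p r x1).filter (fun z => decide (py.2 ≤ z)) :=
            List.mem_filter.mpr ⟨hy, by simpa using hwy'.1⟩
          have hmy : m ≤ y := hmin y hyS
          simp only [decide_eq_true_eq]
          exact ⟨hmy, by omega⟩
      exact le_trans hle (pvLe_maxOver _ hmcol)
  · refine pvMaxOver_le (pvMaxOver_nonneg _ _) fun y1 hy1 => ?_
    obtain ⟨q, hq, rfl⟩ := List.mem_map.mp hy1
    exact pvLe_maxOver _ (List.mem_of_mem_filter hq)

-- ===== VERDICT (by name: the statement is the Claim_ definition above) =====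
theorem most_populated_square_spec : Claim_equal_most_populated_square := by
  intro p r _
  unfold Spec_most_populated_square
  rw [pvA_eq, pvB_eq]
  rw [pvMaxOver_eq_of_mem_iff _ _ (p.map (fun q => q.1))
    (fun a => PySem.Set.mem_ofList (p.map (fun q => q.1)) a)]
  rw [pvMaxOver_map]
  exact pvMaxOver_congr fun px _ => by
    rw [pvMaxOver_congr fun py _ => pvCnt_eq_cntB p r px.1 py.2, pvSlab_max]
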